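-- pv_equiv track=rewrite | github.com/jayounghoyos/Parcial-3-Datos-Algoritmos | main.py | dfs_paths
-- ===== SOURCE A (Python) =====
-- def dfs_paths(graph, start, path=None, visited=None):
--     if visited is None:
--         visited = set()
--     if path is None:
--         path = [start]
--
--     visited.add(start)
--     paths = [path[:]]
--     for neighbor in graph[start]:
--         if neighbor not in visited:
--             path.append(neighbor)
--             paths.extend(dfs_paths(graph, neighbor, path, visited))
--             path.pop()
--     return paths
-- ===== SOURCE B (Python) =====
-- def dfs_paths(graph, start, path=None, visited=None):
--     # Iterative DFS with an explicit stack of (node, path) pairs instead of recursion.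
--     # Like A, mutates the caller-supplied `visited` set in place (return value is what is claimed).
--     if visited is None:
--         visited = set()
--     if path is None:
--         path = [start]
--     visited.add(start)
--     paths = [path[:]]
--     stack = []
--     for nb in reversed(graph[start]):
--         stack.append((nb, path + [nb]))
--     while stack:
--         node, npath = stack.pop()
--         if node in visited:
--             continue
--         visited.add(node)
--         paths.append(npath)
--         for nb in reversed(graph[node]):
--             stack.append((nb, npath + [nb]))
--     return paths
-- ===== Notes on version B (the rewrite author's own statement) =====
-- stated objective: alternative
-- what changed: Replaces A's recursive DFS (with backtracking append/pop of the shared path) by an iterative DFS over an explicit stack of (node, path) pairs, pushing neighbors in reverse to keep A's pre-order.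
-- outside the precondition, e.g. on dfs_paths({1: [], 2: [3]}, 1, None, None): A returns [[1]], B returns [[1]]
import Mathlib
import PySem

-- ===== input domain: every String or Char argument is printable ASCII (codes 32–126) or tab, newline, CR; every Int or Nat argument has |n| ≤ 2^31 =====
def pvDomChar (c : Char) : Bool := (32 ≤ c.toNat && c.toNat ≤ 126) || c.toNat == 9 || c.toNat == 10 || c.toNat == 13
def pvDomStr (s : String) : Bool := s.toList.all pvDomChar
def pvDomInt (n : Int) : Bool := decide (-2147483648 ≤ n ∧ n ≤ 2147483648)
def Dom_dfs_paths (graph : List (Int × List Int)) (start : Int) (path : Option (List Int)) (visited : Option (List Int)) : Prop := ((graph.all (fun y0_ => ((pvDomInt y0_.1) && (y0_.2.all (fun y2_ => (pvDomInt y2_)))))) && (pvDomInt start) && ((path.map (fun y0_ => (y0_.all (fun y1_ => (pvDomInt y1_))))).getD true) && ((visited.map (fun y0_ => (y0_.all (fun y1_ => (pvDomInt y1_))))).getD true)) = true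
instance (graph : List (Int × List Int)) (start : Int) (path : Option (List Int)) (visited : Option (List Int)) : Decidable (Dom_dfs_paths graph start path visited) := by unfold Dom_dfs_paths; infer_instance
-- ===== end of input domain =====

-- B replaces A's recursion by an iterative DFS over an explicit stack of (node, path) pairs
-- (objective: alternative decomposition, same asymptotic cost).  Like A, the Python B mutates a
-- caller-supplied `visited` set in place (A additionally append/pops `path`, restoring it);
-- the equivalence proved here is about the RETURN value.

-- ===== PORT A =====
-- all neighbours listed anywhere in the graph, and their number (used as a fuel bound; on every
-- input admitted by Pre_ the fuel is provably irrelevant — see goA_irrel below)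
def pvU (G : List (Int × List Int)) : List Int := G.flatMap Prod.snd
def pvS (G : List (Int × List Int)) : Nat := (pvU G).length
-- graph[k]: first-match association-list lookup (none = KeyError)
def pvLookup (G : List (Int × List Int)) (k : Int) : Option (List Int) :=
  (G.find? (fun pr => pr.1 == k)).map Prod.snd

-- the recursive body of A: emit path, then fold over graph[start], recursing on unvisited
-- neighbours with path ++ [nb] (Python's append/pop) and threading the mutated visited set
def goA (G : List (Int × List Int)) : Nat → Int → List Int → List Int → List (List Int) × List Int
  | 0, _, _, v => ([], v)
  | f+1, s, p, v =>
    match pvLookup G s with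
    | none => ([p], PySem.Set.add v s)
    | some nbrs =>
        nbrs.foldl (fun acc nb =>
          if PySem.Set.contains acc.2 nb then acc
          else
            let r := goA G f nb (p ++ [nb]) acc.2
            (acc.1 ++ r.1, r.2)) ([p], PySem.Set.add v s)

def dfs_paths (graph : List (Int × List Int)) (start : Int) (path : Option (List Int)) (visited : Option (List Int)) : List (List Int) :=
  let v := visited.getD []
  let p := path.getD [start]
  (goA graph (pvS graph + 2) start p v).1

-- ===== PORT B =====
-- the while-loop of B: pop (node, npath); skip if visited, else mark, emit, push the reversed
-- neighbours (fuel only totalizes the loop; it is provably sufficient under Pre_)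
def goB (G : List (Int × List Int)) : Nat → List (Int × List Int) → List Int → List (List Int) → List (List Int)
  | _, [], _, acc => acc
  | 0, _ :: _, _, acc => acc
  | f+1, (n, p) :: rest, v, acc =>
    if PySem.Set.contains v n then goB G f rest v acc
    else
      let v' := PySem.Set.add v n
      let acc' := acc ++ [p]
      match pvLookup G n with
      | none => acc'
      | some nbrs =>
          goB G f (nbrs.reverse.foldl (fun st nb => (nb, p ++ [nb]) :: st) rest) v' acc'

def dfs_paths_alt (graph : List (Int × List Int)) (start : Int) (path : Option (List Int)) (visited : Option (List Int)) : List (List Int) :=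
  let v := visited.getD []
  let p := path.getD [start]
  let v1 := PySem.Set.add v start
  let paths := [p]
  match pvLookup graph start with
  | none => paths
  | some nbrs =>
      goB graph ((pvS graph + 2) * (pvS graph + 2))
        (nbrs.reverse.foldl (fun st nb => (nb, p ++ [nb]) :: st) []) v1 paths

-- ===== PRECONDITION & SPEC =====
-- Pre_ excludes inputs where A raises KeyError (a node absent from graph is looked up) and, as the
-- closed-form over-approximation of reachability, requires every listed neighbour to be a key
-- unless it is start or pre-visited (those are skipped, never looked up) — slightly stronger than
-- A needs (A also returns when a missing neighbour happens to be unreachable);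
-- duplicate graph keys are excluded because a Python dict cannot carry them.
def Pre_dfs_paths (graph : List (Int × List Int)) (start : Int) (path : Option (List Int)) (visited : Option (List Int)) : Prop :=
  (graph.map Prod.fst).Nodup ∧ start ∈ graph.map Prod.fst ∧
    ∀ pr ∈ graph, ∀ n ∈ pr.2,
      n ∈ graph.map Prod.fst ∨ n = start ∨ n ∈ visited.getD []
instance (graph : List (Int × List Int)) (start : Int) (path : Option (List Int)) (visited : Option (List Int)) : Decidable (Pre_dfs_paths graph start path visited) := by unfold Pre_dfs_paths; infer_instance

def pvWitness_dfs_paths : (List (Int × List Int)) × Int × Option (List Int) × Option (List Int) :=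
  ([(1, [2, 3]), (2, [3]), (3, [1])], 1, none, none)

def Spec_dfs_paths (graph : List (Int × List Int)) (start : Int) (path : Option (List Int)) (visited : Option (List Int)) (out : List (List Int)) : Prop := out = dfs_paths_alt graph start path visited
instance (graph : List (Int × List Int)) (start : Int) (path : Option (List Int)) (visited : Option (List Int)) (out : List (List Int)) : Decidable (Spec_dfs_paths graph start path visited out) := by unfold Spec_dfs_paths; infer_instance

-- ===== CLAIM (what is proved, stated in full; the proofs are below) =====
def Claim_equal_dfs_paths : Prop := ∀ (graph : List (Int × List Int)) (start : Int) (path : Option (List Int)) (visited : Option (List Int)), Dom_dfs_paths graph start path visited → Pre_dfs_paths graph start path visited → Spec_dfs_paths graph start path visited (dfs_paths graph start path visited)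

-- ===== LEMMAS AND PROOFS =====

-- the fold body of goA, named for the proofs
def pvBodyA (G : List (Int × List Int)) (f : Nat) (p : List Int) (acc : List (List Int) × List Int) (nb : Int) : List (List Int) × List Int :=
  if PySem.Set.contains acc.2 nb then acc
  else
    let r := goA G f nb (p ++ [nb]) acc.2
    (acc.1 ++ r.1, r.2)

theorem goA_succ (G : List (Int × List Int)) (f : Nat) (s : Int) (p v : List Int) :
    goA G (f+1) s p v = match pvLookup G s with
      | none => ([p], PySem.Set.add v s)
      | some nbrs => nbrs.foldl (pvBodyA G f p) ([p], PySem.Set.add v s) := rfl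

-- number of listed neighbours not yet visited (the termination/fuel measure)
def pvMissing (G : List (Int × List Int)) (v : List Int) : Nat :=
  ((pvU G).filter (fun x => !(PySem.Set.contains v x))).length

theorem pvMissing_le (G : List (Int × List Int)) (v : List Int) : pvMissing G v ≤ pvS G :=
  List.length_filter_le _ _

theorem pvLookup_sub (G : List (Int × List Int)) (s : Int) (nbrs : List Int)
    (h : pvLookup G s = some nbrs) : ∀ x ∈ nbrs, x ∈ pvU G := by
  unfold pvLookup at h
  obtain ⟨pr, hfind, hsnd⟩ := Option.map_eq_some_iff.mp h
  have hmem : pr ∈ G := List.mem_of_find?_eq_some hfind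
  intro x hx
  exact List.mem_flatMap.mpr ⟨pr, hmem, by simpa [hsnd] using hx⟩

theorem pvLookup_len (G : List (Int × List Int)) (s : Int) (nbrs : List Int)
    (h : pvLookup G s = some nbrs) : nbrs.length ≤ pvS G := by
  unfold pvLookup at h
  obtain ⟨pr, hfind, hsnd⟩ := Option.map_eq_some_iff.mp h
  have hmem : pr ∈ G := List.mem_of_find?_eq_some hfind
  unfold pvS pvU
  subst hsnd
  clear hfind h
  induction G with
  | nil => cases hmem
  | cons a t ih =>
      rcases List.mem_cons.mp hmem with rfl | hmem'
      · simp
      · have := ih hmem'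
        simp only [List.flatMap_cons, List.length_append]
        omega

theorem pvMissing_mono (G : List (Int × List Int)) (v w : List Int)
    (h : ∀ x ∈ v, x ∈ w) : pvMissing G w ≤ pvMissing G v := by
  unfold pvMissing
  apply List.Sublist.length_le
  apply List.monotone_filter_right
  intro a ha
  simp only [Bool.not_eq_true', ← Bool.not_eq_true, PySem.Set.contains_iff] at ha ⊢
  exact fun hav => ha (h a hav)

theorem pvMissing_add_lt (G : List (Int × List Int)) (v : List Int) (x : Int)
    (hU : x ∈ pvU G) (hx : x ∉ v) : pvMissing G (PySem.Set.add v x) < pvMissing G v := by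
  unfold pvMissing
  have himp : ∀ a : Int, (!PySem.Set.contains (PySem.Set.add v x) a) = true →
      (!PySem.Set.contains v a) = true := by
    intro a ha
    simp only [Bool.not_eq_true', ← Bool.not_eq_true, PySem.Set.contains_iff] at ha ⊢
    exact fun hav => ha ((PySem.Set.mem_add _ _ _).mpr (Or.inl hav))
  have hpx : (!PySem.Set.contains v x) = true := by
    simp only [Bool.not_eq_true', ← Bool.not_eq_true, PySem.Set.contains_iff]
    exact hx
  have hqx : (!PySem.Set.contains (PySem.Set.add v x) x) = false := by
    simp [PySem.Set.mem_add]
  clear hx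
  generalize pvU G = U at hU ⊢
  induction U with
  | nil => cases hU
  | cons a t ih =>
      rcases List.mem_cons.mp hU with rfl | hU'
      · have hle := List.Sublist.length_le (List.monotone_filter_right t himp)
        rw [List.filter_cons, List.filter_cons, hqx, hpx]
        simp only [Bool.false_eq_true, if_false, if_true, List.length_cons]
        omega
      · have hlt := ih hU'
        rw [List.filter_cons, List.filter_cons]
        by_cases hq : (!PySem.Set.contains (PySem.Set.add v x) a) = true
        · rw [hq, himp a hq]
          simp only [if_true, List.length_cons]
          omega
        · rw [Bool.not_eq_true] at hq
          rw [hq]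
          simp only [Bool.false_eq_true, if_false]
          by_cases hp : (!PySem.Set.contains v a) = true
          · rw [hp]; simp only [if_true, List.length_cons]; omega
          · rw [Bool.not_eq_true] at hp
            rw [hp]
            simpa using hlt

theorem goA_sub (G : List (Int × List Int)) : ∀ (f : Nat) (s : Int) (p v : List Int) (x : Int),
    x ∈ v → x ∈ (goA G f s p v).2 := by
  intro f
  induction f with
  | zero => intro s p v x hx; simpa [goA] using hx
  | succ f ih =>
      intro s p v x hx
      rw [goA_succ]
      have hx1 : x ∈ PySem.Set.add v s := (PySem.Set.mem_add _ _ _).mpr (Or.inl hx)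
      cases hlk : pvLookup G s with
      | none => exact hx1
      | some nbrs =>
          have key : ∀ (l : List Int) (st : List (List Int) × List Int), x ∈ st.2 →
              x ∈ (l.foldl (pvBodyA G f p) st).2 := by
            intro l
            induction l with
            | nil => intro st h; simpa using h
            | cons nb t iht =>
                intro st h
                rw [List.foldl_cons]
                apply iht
                unfold pvBodyA
                cases hc : PySem.Set.contains st.2 nb with
                | true => simp only [if_true]; exact h
                | false =>
                    simp only [Bool.false_eq_true, if_false]
                    exact ih nb (p ++ [nb]) st.2 x h
          exact key nbrs ([p], PySem.Set.add v s) hx1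

theorem goA_irrel (G : List (Int × List Int)) : ∀ (f g : Nat) (s : Int) (p v : List Int),
    pvMissing G (PySem.Set.add v s) < f → pvMissing G (PySem.Set.add v s) < g →
    goA G f s p v = goA G g s p v := by
  intro f
  induction f using Nat.strong_induction_on with
  | _ f ih =>
    intro g s p v hf hg
    obtain ⟨f', rfl⟩ : ∃ f', f = f' + 1 := ⟨f - 1, by omega⟩
    obtain ⟨g', rfl⟩ : ∃ g', g = g' + 1 := ⟨g - 1, by omega⟩
    rw [goA_succ, goA_succ]
    cases hlk : pvLookup G s with
    | none => rfl
    | some nbrs =>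
        have hsubU := pvLookup_sub G s nbrs hlk
        have key : ∀ (l : List Int), (∀ nb ∈ l, nb ∈ pvU G) →
            ∀ st : List (List Int) × List Int, (∀ y ∈ PySem.Set.add v s, y ∈ st.2) →
            l.foldl (pvBodyA G f' p) st = l.foldl (pvBodyA G g' p) st := by
          intro l
          induction l with
          | nil => intro _ st _; rfl
          | cons nb t iht =>
              intro hl st hst
              rw [List.foldl_cons, List.foldl_cons]
              cases hc : PySem.Set.contains st.2 nb with
              | true =>
                  have e1 : pvBodyA G f' p st nb = st := by
                    unfold pvBodyA; rw [hc]; simp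
                  have e2 : pvBodyA G g' p st nb = st := by
                    unfold pvBodyA; rw [hc]; simp
                  rw [e1, e2]
                  exact iht (fun y hy => hl y (List.mem_cons_of_mem _ hy)) st hst
              | false =>
                  have hnbU : nb ∈ pvU G := hl nb List.mem_cons_self
                  have hnotin : nb ∉ st.2 := by
                    intro hmem
                    rw [(PySem.Set.contains_iff _ _).mpr hmem] at hc
                    cases hc
                  have hlt := pvMissing_add_lt G st.2 nb hnbU hnotin
                  have hmono := pvMissing_mono G (PySem.Set.add v s) st.2 hst
                  have hr : goA G f' nb (p ++ [nb]) st.2 = goA G g' nb (p ++ [nb]) st.2 := by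
                    apply ih f' (by omega) g'
                    · omega
                    · omega
                  have e1 : pvBodyA G f' p st nb
                      = (st.1 ++ (goA G g' nb (p ++ [nb]) st.2).1, (goA G g' nb (p ++ [nb]) st.2).2) := by
                    unfold pvBodyA; rw [hc]; simp [hr]
                  have e2 : pvBodyA G g' p st nb
                      = (st.1 ++ (goA G g' nb (p ++ [nb]) st.2).1, (goA G g' nb (p ++ [nb]) st.2).2) := by
                    unfold pvBodyA; rw [hc]; simp
                  rw [e1, e2]
                  exact iht (fun y hy => hl y (List.mem_cons_of_mem _ hy)) _
                    (fun y hy => goA_sub G g' nb (p ++ [nb]) st.2 y (hst y hy))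
        exact key nbrs hsubU ([p], PySem.Set.add v s) (fun y hy => hy)

theorem rev_foldl_cons {α β : Type} (l : List α) (h : α → β) :
    ∀ rest : List β, l.reverse.foldl (fun st x => h x :: st) rest = l.map h ++ rest := by
  induction l with
  | nil => intro rest; rfl
  | cons a t ih =>
      intro rest
      simp only [List.reverse_cons, List.foldl_append, List.foldl_cons, List.foldl_nil, ih,
        List.map_cons]
      simp

-- one step of the "stack machine = fold of A's recursion" correspondence
def pvStep (G : List (Int × List Int)) (a : List (List Int) × List Int) (e : Int × List Int) : List (List Int) × List Int :=
  if PySem.Set.contains a.2 e.1 then a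
  else
    let r := goA G (pvS G + 2) e.1 e.2 a.2
    (a.1 ++ r.1, r.2)

theorem fold_map_step (G : List (Int × List Int)) (p : List Int) :
    ∀ (nbrs : List Int) (acc : List (List Int)) (st : List (List Int) × List Int),
    (∀ nb ∈ nbrs, nb ∈ pvU G) →
    List.foldl (pvStep G) (acc ++ st.1, st.2) (nbrs.map (fun nb => (nb, p ++ [nb])))
      = (acc ++ (List.foldl (pvBodyA G (pvS G + 1) p) st nbrs).1,
         (List.foldl (pvBodyA G (pvS G + 1) p) st nbrs).2) := by
  intro nbrs
  induction nbrs with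
  | nil => intro acc st _; simp
  | cons nb t iht =>
      intro acc st hl
      rw [List.map_cons, List.foldl_cons, List.foldl_cons]
      cases hc : PySem.Set.contains st.2 nb with
      | true =>
          have e1 : pvStep G (acc ++ st.1, st.2) (nb, p ++ [nb]) = (acc ++ st.1, st.2) := by
            unfold pvStep; rw [hc]; simp
          have e2 : pvBodyA G (pvS G + 1) p st nb = st := by
            unfold pvBodyA; rw [hc]; simp
          rw [e1, e2]
          exact iht acc st (fun y hy => hl y (List.mem_cons_of_mem _ hy))
      | false =>
          have hirr : goA G (pvS G + 2) nb (p ++ [nb]) st.2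
              = goA G (pvS G + 1) nb (p ++ [nb]) st.2 := by
            apply goA_irrel
            · have := pvMissing_le G (PySem.Set.add st.2 nb); omega
            · have := pvMissing_le G (PySem.Set.add st.2 nb); omega
          have e1 : pvStep G (acc ++ st.1, st.2) (nb, p ++ [nb])
              = (acc ++ (st.1 ++ (goA G (pvS G + 1) nb (p ++ [nb]) st.2).1),
                 (goA G (pvS G + 1) nb (p ++ [nb]) st.2).2) := by
            unfold pvStep; rw [hc]; simp [hirr]
          have e2 : pvBodyA G (pvS G + 1) p st nb
              = (st.1 ++ (goA G (pvS G + 1) nb (p ++ [nb]) st.2).1,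
                 (goA G (pvS G + 1) nb (p ++ [nb]) st.2).2) := by
            unfold pvBodyA; rw [hc]; simp
          rw [e1, e2]
          exact iht acc
            (st.1 ++ (goA G (pvS G + 1) nb (p ++ [nb]) st.2).1,
             (goA G (pvS G + 1) nb (p ++ [nb]) st.2).2)
            (fun y hy => hl y (List.mem_cons_of_mem _ hy))

theorem goB_succ (G : List (Int × List Int)) (f : Nat) (n : Int) (p : List Int)
    (rest : List (Int × List Int)) (v : List Int) (acc : List (List Int)) :
    goB G (f+1) ((n, p) :: rest) v acc =
      if PySem.Set.contains v n then goB G f rest v acc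
      else
        match pvLookup G n with
        | none => acc ++ [p]
        | some nbrs =>
            goB G f (nbrs.reverse.foldl (fun st nb => (nb, p ++ [nb]) :: st) rest)
              (PySem.Set.add v n) (acc ++ [p]) := rfl

theorem goB_eq_fold (G : List (Int × List Int)) (W : List Int)
    (HK : ∀ x ∈ pvU G, x ∉ W → (pvLookup G x).isSome) :
    ∀ (fB : Nat) (stack : List (Int × List Int)) (v : List Int) (acc : List (List Int)),
    (∀ y ∈ W, y ∈ v) →
    (∀ e ∈ stack, e.1 ∈ pvU G) →
    pvMissing G v * (pvS G + 2) + stack.length ≤ fB →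
    goB G fB stack v acc = (List.foldl (pvStep G) (acc, v) stack).1 := by
  intro fB
  induction fB with
  | zero =>
      intro stack v acc _ _ hlen
      cases stack with
      | nil => rfl
      | cons e rest =>
          exfalso
          generalize pvMissing G v * (pvS G + 2) = A at hlen
          simp only [List.length_cons] at hlen
          omega
  | succ f ihf =>
      intro stack v acc hW hU hlen
      cases stack with
      | nil => rfl
      | cons e rest =>
          obtain ⟨n, p⟩ := e
          rw [goB_succ, List.foldl_cons]
          cases hc : PySem.Set.contains v n with
          | true =>
              simp only [if_true]
              have estep : pvStep G (acc, v) (n, p) = (acc, v) := by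
                unfold pvStep; rw [hc]; simp
              rw [estep]
              apply ihf rest v acc hW (fun e he => hU e (List.mem_cons_of_mem _ he))
              generalize pvMissing G v * (pvS G + 2) = A at hlen ⊢
              simp only [List.length_cons] at hlen
              omega
          | false =>
              simp only [Bool.false_eq_true, if_false]
              have hnU : n ∈ pvU G := hU (n, p) List.mem_cons_self
              have hnotinv : n ∉ v := by
                intro hmem
                rw [(PySem.Set.contains_iff _ _).mpr hmem] at hc
                cases hc
              obtain ⟨nbrs, hlk⟩ : ∃ nbrs, pvLookup G n = some nbrs := by
                have hk := HK n hnU (fun hnW => hnotinv (hW n hnW))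
                cases h : pvLookup G n with
                | none => rw [h] at hk; cases hk
                | some l => exact ⟨l, rfl⟩
              simp only [hlk]
              rw [rev_foldl_cons]
              have hlt := pvMissing_add_lt G v n hnU hnotinv
              have hnblen := pvLookup_len G n nbrs hlk
              have hsub := pvLookup_sub G n nbrs hlk
              have hU' : ∀ e ∈ nbrs.map (fun nb => (nb, p ++ [nb])) ++ rest, e.1 ∈ pvU G := by
                intro e he
                rcases List.mem_append.mp he with hm | hm
                · obtain ⟨nb, hnb, rfl⟩ := List.mem_map.mp hm
                  exact hsub nb hnb
                · exact hU e (List.mem_cons_of_mem _ hm)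
              have hfuel : pvMissing G (PySem.Set.add v n) * (pvS G + 2)
                  + (nbrs.map (fun nb => (nb, p ++ [nb])) ++ rest).length ≤ f := by
                have h2 : (pvMissing G (PySem.Set.add v n) + 1) * (pvS G + 2)
                    ≤ pvMissing G v * (pvS G + 2) :=
                  Nat.mul_le_mul_right _ (by omega)
                rw [Nat.add_mul, one_mul] at h2
                simp only [List.length_append, List.length_map, List.length_cons] at hlen ⊢
                generalize pvMissing G (PySem.Set.add v n) * (pvS G + 2) = A at h2 ⊢
                generalize pvMissing G v * (pvS G + 2) = B at h2 hlen
                have hS := pvMissing_le G v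
                omega
              rw [ihf _ (PySem.Set.add v n) (acc ++ [p])
                (fun y hy => (PySem.Set.mem_add _ _ _).mpr (Or.inl (hW y hy))) hU' hfuel]
              have hfm := fold_map_step G p nbrs acc ([p], PySem.Set.add v n) hsub
              simp only at hfm
              rw [List.foldl_append, hfm]
              have estep : pvStep G (acc, v) (n, p)
                  = (acc ++ (List.foldl (pvBodyA G (pvS G + 1) p) ([p], PySem.Set.add v n) nbrs).1,
                     (List.foldl (pvBodyA G (pvS G + 1) p) ([p], PySem.Set.add v n) nbrs).2) := by
                unfold pvStep
                rw [hc]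
                simp only [Bool.false_eq_true, if_false]
                rw [show pvS G + 2 = (pvS G + 1) + 1 from rfl, goA_succ]
                simp only [hlk]
              rw [estep]

theorem lookup_some_of_mem_keys (G : List (Int × List Int)) (x : Int)
    (hx : x ∈ G.map Prod.fst) : (pvLookup G x).isSome := by
  obtain ⟨pr, hpr, hfst⟩ := List.mem_map.mp hx
  unfold pvLookup
  rw [Option.isSome_map]
  rw [List.find?_isSome]
  exact ⟨pr, hpr, by simp [hfst]⟩

-- ===== VERDICT (by name: the statement is the Claim_ definition above) =====
theorem dfs_paths_spec : Claim_equal_dfs_paths := by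
  intro graph start path visited _ hpre
  obtain ⟨hnodup, hstart, hclosed⟩ := hpre
  unfold Spec_dfs_paths
  simp only [dfs_paths, dfs_paths_alt]
  obtain ⟨nbrs, hlk⟩ : ∃ nbrs, pvLookup graph start = some nbrs := by
    have hk := lookup_some_of_mem_keys graph start hstart
    cases h : pvLookup graph start with
    | none => rw [h] at hk; cases hk
    | some l => exact ⟨l, rfl⟩
  have HK : ∀ x ∈ pvU graph, x ∉ PySem.Set.add (visited.getD []) start →
      (pvLookup graph x).isSome := by
    intro x hx hxw
    obtain ⟨pr, hpr, hxe⟩ := List.mem_flatMap.mp hx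
    rcases hclosed pr hpr x hxe with hk | hs | hv0
    · exact lookup_some_of_mem_keys graph x hk
    · exact absurd ((PySem.Set.mem_add _ _ _).mpr (Or.inr hs)) hxw
    · exact absurd ((PySem.Set.mem_add _ _ _).mpr (Or.inl hv0)) hxw
  have hsub := pvLookup_sub graph start nbrs hlk
  have hnblen := pvLookup_len graph start nbrs hlk
  rw [show pvS graph + 2 = (pvS graph + 1) + 1 from rfl, goA_succ]
  simp only [hlk]
  rw [rev_foldl_cons]
  set v := visited.getD [] with hv
  set p := path.getD [start] with hp
  have hUst : ∀ e ∈ nbrs.map (fun nb => (nb, p ++ [nb])) ++ ([] : List (Int × List Int)),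
      e.1 ∈ pvU graph := by
    intro e he
    rcases List.mem_append.mp he with hm | hm
    · obtain ⟨nb, hnb, rfl⟩ := List.mem_map.mp hm
      exact hsub nb hnb
    · cases hm
  have hfuel : pvMissing graph (PySem.Set.add v start) * (pvS graph + 2)
      + (nbrs.map (fun nb => (nb, p ++ [nb])) ++ ([] : List (Int × List Int))).length
      ≤ ((pvS graph + 1) + 1) * ((pvS graph + 1) + 1) := by
    have hm := pvMissing_le graph (PySem.Set.add v start)
    have h2 : pvMissing graph (PySem.Set.add v start) * (pvS graph + 2)
        ≤ pvS graph * (pvS graph + 2) := Nat.mul_le_mul_right _ hm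
    have h3 : ((pvS graph + 1) + 1) * ((pvS graph + 1) + 1)
        = pvS graph * (pvS graph + 2) + 2 * (pvS graph + 2) := by ring
    simp only [List.length_append, List.length_map, List.length_nil]
    rw [h3]
    generalize pvMissing graph (PySem.Set.add v start) * (pvS graph + 2) = A at h2 ⊢
    generalize pvS graph * (pvS graph + 2) = B at h2 ⊢
    omega
  rw [goB_eq_fold graph (PySem.Set.add (visited.getD []) start) HK _ _ _ _
    (fun y hy => hy) hUst hfuel]
  have hfm := fold_map_step graph p nbrs [] ([p], PySem.Set.add v start) hsub
  simp only [List.nil_append] at hfm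
  rw [List.foldl_append, hfm]
  simp
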